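-- pv_equiv track=rewrite | github.com/paulduf/xlutils | src/xlutils/utils.py | calc_col_widths
-- ===== SOURCE A (Python) =====
-- def calc_col_widths(
--     headers: list[str],
--     rows: list[list],
--     padding: int = 2,
--     max_width: int = 60,
-- ) -> list[int]:
--     """Return one integer width per column."""
--     widths = []
--     for col_idx, header in enumerate(headers):
--         col_values = [row[col_idx] for row in rows]
--         max_data = max((len(str(v)) for v in col_values), default=0)
--         width = min(max(len(header), max_data) + padding, max_width)
--         widths.append(width)
--     return widths
-- ===== SOURCE B (Python) =====
-- def calc_col_widths(
--     headers: list[str],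
--     rows: list[list],
--     padding: int = 2,
--     max_width: int = 60,
-- ) -> list[int]:
--     """Return one integer width per column."""
--     widths = [len(h) for h in headers]
--     for row in rows:
--         widths = [max(w, len(str(row[i]))) for i, w in enumerate(widths)]
--     return [min(w + padding, max_width) for w in widths]
-- ===== Notes on version B (the rewrite author's own statement) =====
-- stated objective: alternative
-- what changed: B seeds per-column running maxima with the header lengths and updates them in one forward sweep over the rows (rows outer, columns inner), then maps padding/cap at the end, instead of A's per-column rescan of all rows building an intermediate column list.
import Mathlib
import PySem

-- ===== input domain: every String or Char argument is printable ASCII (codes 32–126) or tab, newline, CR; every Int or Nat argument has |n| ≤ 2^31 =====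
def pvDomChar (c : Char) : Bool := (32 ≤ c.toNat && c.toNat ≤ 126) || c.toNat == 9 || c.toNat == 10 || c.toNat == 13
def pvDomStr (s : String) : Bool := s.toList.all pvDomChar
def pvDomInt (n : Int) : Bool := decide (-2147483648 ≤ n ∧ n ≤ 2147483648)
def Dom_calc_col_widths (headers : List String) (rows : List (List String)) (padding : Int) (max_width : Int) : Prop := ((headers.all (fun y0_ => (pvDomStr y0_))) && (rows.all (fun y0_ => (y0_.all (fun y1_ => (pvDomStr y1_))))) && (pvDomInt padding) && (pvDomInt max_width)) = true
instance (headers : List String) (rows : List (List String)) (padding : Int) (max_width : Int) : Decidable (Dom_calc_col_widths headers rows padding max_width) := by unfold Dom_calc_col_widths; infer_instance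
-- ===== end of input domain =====

-- B computes the per-column running maxima in one forward sweep over the rows (seeded by the
-- header lengths), instead of A's per-column rescan of all rows; alternative decomposition, same cost.


-- ===== PORT A =====
-- literal port of A: for each (col_idx, header), gather the column values, take the max data
-- length (default 0), append min(max(len header, max_data) + padding, max_width).
-- row[col_idx] is pyGetD (IndexError excluded by Pre_); max(gen, default=0) is foldl max 0,
-- exact here since every string length is ≥ 0.
def calc_col_widths (headers : List String) (rows : List (List String)) (padding : Int) (max_width : Int) : List Int :=
  (PySem.List.enumerate headers).foldl (fun widths p =>
    let col_values := rows.map (fun row => PySem.List.pyGetD row p.1 "")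
    let max_data := (col_values.map (fun v => PySem.Str.len v)).foldl max 0
    widths ++ [min (max (PySem.Str.len p.2) max_data + padding) max_width]) []

-- ===== PORT B =====
-- port of Source B: seed widths with header lengths, one sweep over rows updating running maxima,
-- then map the padding/cap.  row[i] is pyGetD (IndexError excluded by Pre_).
def calc_col_widths_alt (headers : List String) (rows : List (List String)) (padding : Int) (max_width : Int) : List Int :=
  let widths0 := headers.map (fun h => PySem.Str.len h)
  let widths := rows.foldl (fun ws row =>
    (PySem.List.enumerate ws).map (fun p => max p.2 (PySem.Str.len (PySem.List.pyGetD row p.1 "")))) widths0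
  widths.map (fun w => min (w + padding) max_width)

-- ===== PRECONDITION & SPEC =====
-- A raises IndexError (row[col_idx]) when some row is shorter than headers; Pre_ excludes exactly those inputs.
def Pre_calc_col_widths (headers : List String) (rows : List (List String)) (_padding : Int) (_max_width : Int) : Prop :=
  ∀ r ∈ rows, headers.length ≤ r.length

instance (headers : List String) (rows : List (List String)) (padding : Int) (max_width : Int) : Decidable (Pre_calc_col_widths headers rows padding max_width) := by unfold Pre_calc_col_widths; infer_instance

def pvWitness_calc_col_widths : List String × List (List String) × Int × Int :=
  (["ab", "c"], [["xyz", "1"], ["q", "hello"]], 2, 60)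

def Spec_calc_col_widths (headers : List String) (rows : List (List String)) (padding : Int) (max_width : Int) (out : List Int) : Prop := out = calc_col_widths_alt headers rows padding max_width
instance (headers : List String) (rows : List (List String)) (padding : Int) (max_width : Int) (out : List Int) : Decidable (Spec_calc_col_widths headers rows padding max_width out) := by unfold Spec_calc_col_widths; infer_instance

-- ===== CLAIM (what is proved, stated in full; the proofs are below) =====
def Claim_equal_calc_col_widths : Prop := ∀ (headers : List String) (rows : List (List String)) (padding : Int) (max_width : Int), Dom_calc_col_widths headers rows padding max_width → Pre_calc_col_widths headers rows padding max_width → Spec_calc_col_widths headers rows padding max_width (calc_col_widths headers rows padding max_width)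

-- ===== LEMMAS AND PROOFS =====

theorem pvLen_nonneg (s : String) : 0 ≤ PySem.Str.len s := by
  simp [PySem.Str.len_eq]

-- max a (foldl max b xs) = foldl max (max a b) xs
theorem pvFoldl_max (xs : List Int) : ∀ a b : Int, xs.foldl max (max a b) = max a (xs.foldl max b) := by
  induction xs with
  | nil => intro a b; rfl
  | cons x xs ih =>
    intro a b
    simp only [List.foldl_cons, max_assoc]
    exact ih a (max b x)

-- B's sweep preserves length
theorem pvAltStep_length (rows : List (List String)) :
    ∀ ws : List Int,
      (rows.foldl (fun ws row =>
        (PySem.List.enumerate ws).map (fun p => max p.2 (PySem.Str.len (PySem.List.pyGetD row p.1 "")))) ws).length = ws.length := by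
  induction rows with
  | nil => intro ws; rfl
  | cons r rs ih =>
    intro ws
    rw [List.foldl_cons, ih]
    simp [PySem.List.length_enumerate]

-- element i of B's sweep is the running max over the rows seeded with ws[i]
theorem pvAltStep_get (rows : List (List String)) :
    ∀ (ws : List Int) (i : Nat), i < ws.length →
      (rows.foldl (fun ws row =>
        (PySem.List.enumerate ws).map (fun p => max p.2 (PySem.Str.len (PySem.List.pyGetD row p.1 "")))) ws)[i]? =
      some (rows.foldl (fun a row => max a (PySem.Str.len (PySem.List.pyGetD row (i : Int) ""))) ws[i]!) := by
  induction rows with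
  | nil =>
    intro ws i hi
    simp [List.getElem!_eq_getElem?_getD, List.getElem?_eq_getElem hi]
  | cons r rs ih =>
    intro ws i hi
    rw [List.foldl_cons]
    have hi' : i < ((PySem.List.enumerate ws).map (fun p => max p.2 (PySem.Str.len (PySem.List.pyGetD r p.1 "")))).length := by
      simp [PySem.List.length_enumerate]; omega
    rw [ih _ i hi']
    congr 1
    rw [List.foldl_cons]
    congr 1
    simp [List.getElem!_eq_getElem?_getD, List.getElem?_eq_getElem hi, List.getElem?_eq_getElem hi']

-- ===== VERDICT (by name: the statement is the Claim_ definition above) =====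
theorem calc_col_widths_spec : Claim_equal_calc_col_widths := by
  intro headers rows padding max_width _ _
  unfold Spec_calc_col_widths calc_col_widths calc_col_widths_alt
  rw [PySem.List.foldl_append_singleton_eq_map]
  simp only [List.nil_append]
  apply List.ext_getElem?
  intro i
  by_cases hi : i < headers.length
  · have hi' : i < (headers.map (fun h => PySem.Str.len h)).length := by simp; omega
    rw [List.getElem?_map, PySem.List.getElem?_enumerate]
    rw [List.getElem?_map, pvAltStep_get rows _ i hi']
    rw [List.getElem?_eq_getElem hi]
    simp only [Option.map_some, zero_add]
    congr 1
    have hseed : (headers.map (fun h => PySem.Str.len h))[i]! = PySem.Str.len headers[i] := by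
      simp [List.getElem!_eq_getElem?_getD, List.getElem?_eq_getElem hi]
    rw [hseed]
    congr 1
    have h := pvFoldl_max (rows.map (fun row => PySem.Str.len (PySem.List.pyGetD row (i : Int) "")))
        (PySem.Str.len headers[i]) 0
    rw [max_eq_left (pvLen_nonneg _)] at h
    conv_rhs => rw [← List.foldl_map
      (f := fun row => PySem.Str.len (PySem.List.pyGetD row (i : Int) "")) (g := max)]
    rw [h]
    simp [List.map_map, Function.comp_def]
  · trans (none : Option Int)
    · exact List.getElem?_eq_none (by simp [PySem.List.length_enumerate]; omega)
    · symm
      exact List.getElem?_eq_none (by rw [List.length_map, pvAltStep_length]; simp; omega)
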